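-- pv_equiv track=rewrite | github.com/xuxiao305/Lyra2 | lyra_2/_src/datasets/depth_warp_dataloader.py | _sample_frame_indices
-- ===== SOURCE A (Python) =====
-- def _sample_frame_indices(total_frames, N, video_mirror=False):
--     """Sample N frame indices starting from 0 with stride 1.
--     If video_mirror is True, extends short clips by mirroring before sampling.
--     """
--     if video_mirror:
--         mapping = list(range(total_frames))
--         n_repeat = max((N - total_frames) // (total_frames - 1), 0) + 1
--         mapping_repeat = mapping.copy()
--         for i in range(n_repeat):
--             mapping_repeat += mapping[-2::-1] if i % 2 == 0 else mapping[1:]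
--         return [mapping_repeat[i] for i in range(N)]
--     else:
--         if total_frames < N:
--             idx = list(range(total_frames))
--             idx += [total_frames - 1] * (N - total_frames)
--             return idx
--         return list(range(N))
-- ===== SOURCE B (Python) =====
-- def _sample_frame_indices(total_frames, N, video_mirror=False):
--     """Sample N frame indices starting from 0 with stride 1.
--     If video_mirror is True, extends short clips by mirroring before sampling."""
--     if video_mirror:
--         mapping = list(range(total_frames))
--         period = 2 * (total_frames - 1)
--         out = []
--         for i in range(N):
--             q = i % period
--             out.append(mapping[q] if q < total_frames else mapping[period - q])
--         return out
--     else: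
--         return list(range(min(N, total_frames))) + [total_frames - 1] * max(N - total_frames, 0)
-- ===== Notes on version B (the rewrite author's own statement) =====
-- stated objective: simpler
-- what changed: The mirror branch no longer materialises a repeatedly-concatenated mirrored list and indexes into it: B computes each of the N indices directly with a triangle-wave formula q = i % (2*(total_frames-1)) reflected at the ends, and the non-mirror branch becomes a single range-plus-padding expression.
import Mathlib
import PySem

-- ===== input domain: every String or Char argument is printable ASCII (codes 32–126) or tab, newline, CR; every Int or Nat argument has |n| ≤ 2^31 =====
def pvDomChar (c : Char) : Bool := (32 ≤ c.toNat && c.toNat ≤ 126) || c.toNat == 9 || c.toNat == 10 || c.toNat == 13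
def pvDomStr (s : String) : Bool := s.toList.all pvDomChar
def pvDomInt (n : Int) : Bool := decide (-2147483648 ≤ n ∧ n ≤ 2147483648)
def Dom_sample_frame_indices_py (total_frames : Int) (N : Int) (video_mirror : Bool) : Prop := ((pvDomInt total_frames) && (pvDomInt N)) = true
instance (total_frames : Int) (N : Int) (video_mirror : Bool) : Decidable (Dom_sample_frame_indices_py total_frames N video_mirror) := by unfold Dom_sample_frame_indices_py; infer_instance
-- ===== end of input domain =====

-- B replaces A's iterated block-concatenation in the mirror branch by a direct triangle-wave
-- index into the frame list, and A's two non-mirror branches by one range-plus-padding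
-- expression (objective: simpler). Equivalence is about the return value; neither mutates inputs.

-- ===== PORT A =====
def sample_frame_indices_py (total_frames : Int) (N : Int) (video_mirror : Bool) : List Int :=
  if video_mirror then
    let mapping := PySem.List.pyRange 0 total_frames 1
    let n_repeat := max (PySem.Int.floordiv (N - total_frames) (total_frames - 1)) 0 + 1
    -- mapping_repeat is kept as an Array (a Python list is an array: O(1) indexing, amortized
    -- extend); mapping[-2::-1] is the reverse of mapping[:-1] — exact for every list
    let mapping_repeat := (PySem.List.pyRange 0 n_repeat 1).foldl
      (fun acc i =>
        acc ++ (if PySem.Int.mod i 2 = 0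
                then (PySem.List.slice mapping none (some (-1))).reverse
                else PySem.List.slice mapping (some 1) none).toArray)
      mapping.toArray
    -- mapping_repeat[i]: i ranges over 0 ≤ i < N, so plain array indexing is exact here
    (PySem.List.pyRange 0 N 1).map (fun i => (mapping_repeat[i.toNat]?).getD 0)
  else
    if total_frames < N then
      PySem.List.pyRange 0 total_frames 1
        ++ List.replicate (N - total_frames).toNat (total_frames - 1)
    else
      PySem.List.pyRange 0 N 1

-- ===== PORT B =====
def sample_frame_indices_py_alt (total_frames : Int) (N : Int) (video_mirror : Bool) : List Int :=
  if video_mirror then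
    -- mapping as an Array (a Python list); under Pre_ both indices are in [0, total_frames)
    let mapping := (PySem.List.pyRange 0 total_frames 1).toArray
    let period := 2 * (total_frames - 1)
    (PySem.List.pyRange 0 N 1).map (fun i =>
      let q := PySem.Int.mod i period
      if q < total_frames then (mapping[q.toNat]?).getD 0
      else (mapping[(period - q).toNat]?).getD 0)
  else
    PySem.List.pyRange 0 (min N total_frames) 1
      ++ List.replicate (max (N - total_frames) 0).toNat (total_frames - 1)

-- ===== PRECONDITION & SPEC =====
-- Pre_ excludes exactly the mirror-branch inputs on which A raises: total_frames = 1
-- (ZeroDivisionError in (N - total_frames) // (total_frames - 1)) and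
-- total_frames ≤ 0 with N > 0 (IndexError: mapping stays empty, mapping_repeat[i] fails).
def Pre_sample_frame_indices_py (total_frames : Int) (N : Int) (video_mirror : Bool) : Prop :=
  video_mirror = true → (total_frames ≠ 1 ∧ (2 ≤ total_frames ∨ N ≤ 0))
instance (total_frames : Int) (N : Int) (video_mirror : Bool) : Decidable (Pre_sample_frame_indices_py total_frames N video_mirror) := by unfold Pre_sample_frame_indices_py; infer_instance

def pvWitness_sample_frame_indices_py : Int × Int × Bool := (4, 7, true)

def Spec_sample_frame_indices_py (total_frames : Int) (N : Int) (video_mirror : Bool) (out : List Int) : Prop := out = sample_frame_indices_py_alt total_frames N video_mirror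
instance (total_frames : Int) (N : Int) (video_mirror : Bool) (out : List Int) : Decidable (Spec_sample_frame_indices_py total_frames N video_mirror out) := by unfold Spec_sample_frame_indices_py; infer_instance

-- ===== CLAIM (what is proved, stated in full; the proofs are below) =====
def Claim_equal_sample_frame_indices_py : Prop := ∀ (total_frames : Int) (N : Int) (video_mirror : Bool), Dom_sample_frame_indices_py total_frames N video_mirror → Pre_sample_frame_indices_py total_frames N video_mirror → Spec_sample_frame_indices_py total_frames N video_mirror (sample_frame_indices_py total_frames N video_mirror)

-- ===== LEMMAS AND PROOFS =====

lemma revblock_eq (tf : Int) (h : 2 ≤ tf) :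
    (PySem.List.slice (PySem.List.pyRange 0 tf 1) none (some (-1))).reverse
      = (List.range (tf - 1).toNat).map (fun j : Nat => tf - 2 - (j : Int)) := by
  rw [PySem.List.slice_to_neg_one]
  rw [show PySem.List.pyRange 0 tf 1 = PySem.List.pyRange 0 ((tf-1)+1) 1 by norm_num,
      PySem.List.pyRange_one_succ_right (by omega : (0:Int) ≤ tf - 1), List.dropLast_concat]
  rw [show PySem.List.pyRange 0 (tf-1) 1 = PySem.List.pyRange ((-1:Int)+1) ((tf-2)+1) 1 by rw [show (tf-2)+(1:Int) = tf-1 by ring]; norm_num,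
      ← PySem.List.pyRange_neg_one_eq_reverse, PySem.List.pyRange_neg_one,
      show ((tf-2:Int) - (-1)).toNat = (tf-1).toNat by omega]

lemma fwdblock_eq (tf : Int) (h : 1 ≤ tf) :
    PySem.List.slice (PySem.List.pyRange 0 tf 1) (some 1) none
      = (List.range (tf - 1).toNat).map (fun j : Nat => 1 + (j : Int)) := by
  rw [PySem.List.slice_from_one, PySem.List.pyRange_one_cons (by omega : (0:Int) < tf)]
  rw [show (0:Int) + 1 = 1 from rfl, List.tail_cons, PySem.List.pyRange_one]

def triI (tf i : Int) : Int :=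
  if PySem.Int.mod i (2 * (tf - 1)) < tf then PySem.Int.mod i (2 * (tf - 1))
  else 2 * (tf - 1) - PySem.Int.mod i (2 * (tf - 1))

lemma triI_base (tf i : Int) (h : 2 ≤ tf) (h0 : 0 ≤ i) (h1 : i < tf) : triI tf i = i := by
  unfold triI
  rw [PySem.Int.mod_eq_emod_of_pos (by omega), Int.emod_eq_of_lt h0 (by omega)]
  simp [h1]

lemma triI_even (tf c j : Int) (h : 2 ≤ tf) (h0 : 0 ≤ j) (h1 : j ≤ tf - 2) :
    triI tf (tf + 2*c*(tf-1) + j) = tf - 2 - j := by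
  unfold triI
  rw [PySem.Int.mod_eq_emod_of_pos (by omega : (0:Int) < 2*(tf-1))]
  have : tf + 2*c*(tf-1) + j = (tf + j) + (2*(tf-1)) * c := by ring
  rw [this, Int.add_mul_emod_self_left]
  by_cases hj : j = tf - 2
  · rw [show tf + j = 2*(tf-1) by omega, Int.emod_self]
    rw [if_pos (by omega)]; omega
  · rw [Int.emod_eq_of_lt (by omega) (by omega)]
    rw [if_neg (by omega)]; omega

lemma triI_odd (tf c j : Int) (h : 2 ≤ tf) (h0 : 0 ≤ j) (h1 : j ≤ tf - 2) :
    triI tf (tf + (2*c+1)*(tf-1) + j) = 1 + j := by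
  unfold triI
  rw [PySem.Int.mod_eq_emod_of_pos (by omega : (0:Int) < 2*(tf-1))]
  have : tf + (2*c+1)*(tf-1) + j = (1 + j) + (2*(tf-1)) * (c+1) := by ring
  rw [this, Int.add_mul_emod_self_left, Int.emod_eq_of_lt (by omega) (by omega)]
  rw [if_pos (by omega)]

lemma foldA_eq (tf : Int) (h : 2 ≤ tf) (k : Nat) :
    (PySem.List.pyRange 0 (k : Int) 1).foldl
      (fun acc i =>
        acc ++ (if PySem.Int.mod i 2 = 0
                then (PySem.List.slice (PySem.List.pyRange 0 tf 1) none (some (-1))).reverse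
                else PySem.List.slice (PySem.List.pyRange 0 tf 1) (some 1) none))
      (PySem.List.pyRange 0 tf 1)
    = (PySem.List.pyRange 0 (tf + (k : Int) * (tf - 1)) 1).map (triI tf) := by
  induction k with
  | zero =>
    rw [Nat.cast_zero, PySem.List.pyRange_one_eq_nil (le_refl (0:Int)), List.foldl_nil,
        zero_mul, add_zero]
    symm
    have hid : ∀ i ∈ PySem.List.pyRange 0 tf 1, triI tf i = (fun i : Int => i) i := by
      intro i hi
      have := PySem.List.mem_pyRange_one.mp hi
      exact triI_base tf i h this.1 this.2
    rw [List.map_congr_left hid, List.map_id']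
  | succ k ih =>
    rw [Nat.cast_succ, PySem.List.pyRange_one_succ_right (by positivity), List.foldl_append,
        List.foldl_cons, List.foldl_nil, ih]
    have hk0 : 0 ≤ (k:Int) * (tf - 1) := mul_nonneg (by positivity) (by omega)
    have hsplit : tf + ((k:Int) + 1) * (tf - 1) = (tf + (k:Int)*(tf-1)) + (tf - 1) := by ring
    rw [hsplit, PySem.List.pyRange_one_append 0 (tf + (k:Int)*(tf-1))
          ((tf + (k:Int)*(tf-1)) + (tf - 1)) (by omega) (by omega), List.map_append]
    congr 1
    rw [PySem.List.pyRange_one (tf + (k:Int)*(tf-1)) _,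
        show ((tf + (k:Int)*(tf-1)) + (tf - 1) - (tf + (k:Int)*(tf-1))) = tf - 1 by ring,
        List.map_map]
    rcases Nat.even_or_odd k with ⟨c, hc⟩ | ⟨c, hc⟩
    · rw [if_pos (by rw [PySem.Int.mod_eq_emod_of_pos (by omega : (0:Int) < 2)]; omega)]
      rw [revblock_eq tf h]
      apply List.map_congr_left
      intro j hj
      have hj' : (j:Int) ≤ tf - 2 := by have := List.mem_range.mp hj; omega
      have hs : tf + (k:Int)*(tf-1) + (j:Int) = tf + 2*(c:Int)*(tf-1) + (j:Int) := by
        have hkc : (k:Int) = 2*(c:Int) := by omega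
        rw [hkc]
      simp only [Function.comp_apply]
      rw [hs, triI_even tf (c:Int) (j:Int) h (by positivity) hj']
    · rw [if_neg (by rw [PySem.Int.mod_eq_emod_of_pos (by omega : (0:Int) < 2)]; omega)]
      rw [fwdblock_eq tf (by omega)]
      apply List.map_congr_left
      intro j hj
      have hj' : (j:Int) ≤ tf - 2 := by have := List.mem_range.mp hj; omega
      have hs : tf + (k:Int)*(tf-1) + (j:Int) = tf + (2*(c:Int)+1)*(tf-1) + (j:Int) := by
        have hkc : (k:Int) = 2*(c:Int)+1 := by omega
        rw [hkc]
      simp only [Function.comp_apply]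
      rw [hs, triI_odd tf (c:Int) (j:Int) h (by positivity) hj']


lemma foldl_toArray {α β : Type} (f : β → List α) (l : List β) (xs : List α) :
    l.foldl (fun acc i => acc ++ (f i).toArray) xs.toArray
      = (l.foldl (fun acc i => acc ++ f i) xs).toArray := by
  induction l generalizing xs with
  | nil => rfl
  | cons b l ih => rw [List.foldl_cons, List.foldl_cons,
        show xs.toArray ++ (f b).toArray = (xs ++ f b).toArray from (Array.toArray_eq_append_iff.mpr rfl).symm, ih]

lemma getElem?_toArray_map_triI (tf L i : Int) (h0 : 0 ≤ i) (hL : i < L) :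
    ((((PySem.List.pyRange 0 L 1).map (triI tf)).toArray)[i.toNat]?).getD 0 = triI tf i := by
  rw [List.getElem?_toArray,
      show L = ((L.toNat : Nat) : Int) from (Int.toNat_of_nonneg (by omega)).symm,
      PySem.List.getElem?_map_pyRange_zero (triI tf) L.toNat i.toNat (by omega),
      Int.toNat_of_nonneg h0, Option.getD_some]

-- ===== VERDICT (by name: the statement is the Claim_ definition above) =====
theorem sample_frame_indices_py_spec : Claim_equal_sample_frame_indices_py := by
  intro tf N m _ hpre
  unfold Spec_sample_frame_indices_py
  replace hpre : m = true → (tf ≠ 1 ∧ (2 ≤ tf ∨ N ≤ 0)) := hpre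
  unfold sample_frame_indices_py sample_frame_indices_py_alt
  cases m with
  | false =>
    simp only [Bool.false_eq_true, if_false]
    by_cases hlt : tf < N
    · rw [if_pos hlt, show min N tf = tf by omega, show max (N - tf) 0 = N - tf by omega]
    · rw [if_neg hlt, show min N tf = N by omega, show max (N - tf) 0 = 0 by omega]
      simp
  | true =>
    obtain ⟨h1, h2⟩ := hpre rfl
    simp only [if_true]
    by_cases hN : N ≤ 0
    · rw [PySem.List.pyRange_one_eq_nil hN]
      simp
    · have htf2 : 2 ≤ tf := by omega
      have hnr1 : (1:Int) ≤ max (PySem.Int.floordiv (N - tf) (tf - 1)) 0 + 1 := by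
        have := le_max_right (PySem.Int.floordiv (N - tf) (tf - 1)) 0
        omega
      set nr := max (PySem.Int.floordiv (N - tf) (tf - 1)) 0 + 1 with hnrdef
      have hnrcast : ((nr.toNat : Int)) = nr := Int.toNat_of_nonneg (by omega)
      rw [← hnrcast, foldl_toArray, foldA_eq tf htf2 nr.toNat]
      have hNL : N ≤ tf + (nr.toNat : Int) * (tf - 1) := by
        rw [hnrcast]
        by_cases hcase : N ≤ tf
        · have : 0 ≤ nr * (tf - 1) := mul_nonneg (by omega) (by omega)
          omega
        · have hd0 : 0 ≤ PySem.Int.floordiv (N - tf) (tf - 1) := by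
            rw [PySem.Int.floordiv_eq_ediv_of_pos (by omega)]
            exact Int.ediv_nonneg (by omega) (by omega)
          have hmax : max (PySem.Int.floordiv (N - tf) (tf - 1)) 0
              = PySem.Int.floordiv (N - tf) (tf - 1) := by omega
          have hdd := PySem.Int.floordiv_mul_add_mod (N - tf) (tf - 1)
          have hr0 := PySem.Int.mod_nonneg (N - tf) (b := tf - 1) (by omega)
          have hr1 := PySem.Int.mod_lt (N - tf) (b := tf - 1) (by omega)
          have hexp : nr * (tf - 1)
              = PySem.Int.floordiv (N - tf) (tf - 1) * (tf - 1) + (tf - 1) := by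
            rw [hnrdef, hmax]; ring
          omega
      apply List.map_congr_left
      intro i hi
      obtain ⟨hi0, hiN⟩ := PySem.List.mem_pyRange_one.mp hi
      rw [getElem?_toArray_map_triI tf _ i hi0 (by omega)]
      symm
      show (if PySem.Int.mod i (2 * (tf - 1)) < tf
            then (((PySem.List.pyRange 0 tf 1).toArray)[(PySem.Int.mod i (2 * (tf - 1))).toNat]?).getD 0
            else (((PySem.List.pyRange 0 tf 1).toArray)[(2 * (tf - 1) - PySem.Int.mod i (2 * (tf - 1))).toNat]?).getD 0)
          = triI tf i
      have hp : (0 : Int) < 2 * (tf - 1) := by omega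
      have hq0 := PySem.Int.mod_nonneg i (b := 2 * (tf - 1)) hp
      have hq1 := PySem.Int.mod_lt i (b := 2 * (tf - 1)) hp
      have harr : ∀ q : Int, 0 ≤ q → q < tf →
          ((((PySem.List.pyRange 0 tf 1)).toArray)[q.toNat]?).getD 0 = q := by
        intro q hq0' hq1'
        rw [List.getElem?_toArray, PySem.List.pyRange_zero,
            List.getElem?_map, List.getElem?_range (by omega : q.toNat < tf.toNat)]
        simp [Option.getD_some]
        omega
      unfold triI
      by_cases hq : PySem.Int.mod i (2 * (tf - 1)) < tf
      · rw [if_pos hq, if_pos hq, harr _ hq0 hq]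
      · rw [if_neg hq, if_neg hq, harr _ (by omega) (by omega)]
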